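-- pv_equiv track=rewrite | github.com/MarSerMer/Python_practice_2 | Python_practice_2/homework_3/hw_3_task_1.py | strange_task
-- ===== SOURCE A (Python) =====
-- def strange_task(incoming_dict: dict) -> dict:
--     res_dict: dict = {}
--     all_things: set = set()
--     for things in incoming_dict.values(): # получаем список вообще всех вещей у всех
--         all_things = all_things.union(set(things))
--     target_things = []
--     for thing in all_things: # получаем список вещей, которых нет только у кого-то одного
--         count: int = 0
--         for individual_lists_of_things in incoming_dict.values():
--             if thing in individual_lists_of_things:
--                 count +=1
--         if count == len(incoming_dict) - 1:
--             target_things.append(thing)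
--     for target in target_things:
--         for names in incoming_dict.keys():
--             if target not in incoming_dict[names]:
--                 res_dict[target] = f'- эту вещь не взял {names}'
--     return res_dict
-- ===== SOURCE B (Python) =====
-- def strange_task(incoming_dict: dict) -> dict:
--     # One pass builds an item -> set-of-owners index; then each indexed item is
--     # checked once and the single missing owner found by a single scan of names.
--     owners: dict = {}
--     for name, things in incoming_dict.items():
--         for t in things:
--             owners.setdefault(t, set()).add(name)
--     n = len(incoming_dict)
--     res: dict = {}
--     for t, who in owners.items():
--         if len(who) == n - 1:
--             missing = next(nm for nm in incoming_dict if nm not in who)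
--             res[t] = f'- эту вещь не взял {missing}'
--     return res
-- ===== Notes on version B (the rewrite author's own statement) =====
-- stated objective: faster
-- what changed: A rescans the whole dict per item three times (count owners per item, filter items, rescan all names per target); B builds an item->set-of-owners index in one pass over the dict and then decides each item and finds its single missing owner in one scan of the names.
import Mathlib
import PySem

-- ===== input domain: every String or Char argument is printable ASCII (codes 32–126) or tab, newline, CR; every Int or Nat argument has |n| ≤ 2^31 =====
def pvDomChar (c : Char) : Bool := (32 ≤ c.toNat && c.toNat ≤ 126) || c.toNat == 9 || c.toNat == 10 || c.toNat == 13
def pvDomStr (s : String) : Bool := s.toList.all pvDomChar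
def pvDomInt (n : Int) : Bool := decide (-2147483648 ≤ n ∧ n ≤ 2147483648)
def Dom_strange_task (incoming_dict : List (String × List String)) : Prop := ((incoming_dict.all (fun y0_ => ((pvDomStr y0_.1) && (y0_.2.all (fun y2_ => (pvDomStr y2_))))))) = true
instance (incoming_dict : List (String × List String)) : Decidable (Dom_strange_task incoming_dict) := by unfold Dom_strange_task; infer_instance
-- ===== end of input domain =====

-- B replaces A's three rescanning loops by one item→owners index built in a single pass,
-- then finds each missing owner by a single scan; same returned dict.

-- ===== PORT A =====
-- literal port of A; the dict argument is materialised as a PySem.Dict (duplicate keys overwrite, like a Python dict);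
-- `incoming_dict[names]` is `dd.getD names []` — `names` ranges over the keys, so the lookup never misses and getD is exact
def strange_task (incoming_dict : List (String × List String)) : List (String × String) :=
  let dd : PySem.Dict String (List String) := PySem.Dict.ofList incoming_dict
  let all_things : PySem.Set String :=
    dd.values.foldl (fun s things => PySem.Set.union s (PySem.Set.ofList things)) PySem.Set.empty
  let target_things : List String :=
    all_things.foldl (fun acc thing =>
      let count : Int := dd.values.foldl
        (fun c individual_lists_of_things =>
          if individual_lists_of_things.contains thing then c + 1 else c) 0
      if count = (dd.size : Int) - 1 then acc ++ [thing] else acc) []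
  let res_dict : PySem.Dict String String :=
    target_things.foldl (fun r target =>
      dd.keys.foldl (fun r names =>
        if !((dd.getD names []).contains target) then
          r.insert target ("- эту вещь не взял " ++ names)
        else r) r) PySem.Dict.empty
  res_dict.items

-- ===== PORT B =====
-- literal port of Source B: build the owners index (setdefault+add = modify with Set.add), then one pass over its items;
-- the `| [] => r` branch is where Python's `next` would raise StopIteration — never reached, as the proof shows
def strange_task_alt (incoming_dict : List (String × List String)) : List (String × String) :=
  let dd : PySem.Dict String (List String) := PySem.Dict.ofList incoming_dict
  let owners : PySem.Dict String (PySem.Set String) :=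
    dd.items.foldl (fun o p =>
      p.2.foldl (fun o t => o.modify t PySem.Set.empty (fun s => s.add p.1)) o) PySem.Dict.empty
  let res : PySem.Dict String String :=
    owners.items.foldl (fun r tw =>
      if PySem.Set.len tw.2 = (dd.size : Int) - 1 then
        match dd.keys.filter (fun nm => !(PySem.Set.contains tw.2 nm)) with
        | missing :: _ => r.insert tw.1 ("- эту вещь не взял " ++ missing)
        | [] => r
      else r) PySem.Dict.empty
  res.items

-- ===== PRECONDITION & SPEC =====
def Spec_strange_task (incoming_dict : List (String × List String)) (out : List (String × String)) : Prop := out = strange_task_alt incoming_dict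
instance (incoming_dict : List (String × List String)) (out : List (String × String)) : Decidable (Spec_strange_task incoming_dict out) := by unfold Spec_strange_task; infer_instance

-- ===== CLAIM (what is proved, stated in full; the proofs are below) =====
def Claim_equal_strange_task : Prop := ∀ (incoming_dict : List (String × List String)), Dom_strange_task incoming_dict → Spec_strange_task incoming_dict (strange_task incoming_dict)

-- ===== LEMMAS AND PROOFS =====

-- proof-side abbreviations
def pvWho (L : List (String × List String)) (t : String) : List String :=
  (L.filter (fun p => p.2.contains t)).map Prod.fst

def pvMiss (L : List (String × List String)) (t : String) : List String :=
  (L.filter (fun p => !(p.2.contains t))).map Prod.fst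

def pvm (L : List (String × List String)) (t : String) : String := (pvMiss L t).headD ""

def pvALL (L : List (String × List String)) : PySem.Set String :=
  L.foldl (fun ks p => PySem.Set.update ks p.2) PySem.Set.empty

-- membership through a foldl of Set.add
theorem pv_mem_foldl_add (t : List String) : ∀ (s : PySem.Set String) (y : String),
    y ∈ List.foldl PySem.Set.add s t ↔ y ∈ s ∨ y ∈ t := by
  induction t with
  | nil => simp
  | cons x t ih =>
    intro s y
    simp only [List.foldl_cons, ih, PySem.Set.mem_add, List.mem_cons]
    tauto

-- folding the elements of `Set.add t x` into s = folding t, then adding x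
theorem pv_foldl_add_add (t : List String) (x : String) (s : PySem.Set String) :
    List.foldl PySem.Set.add s (PySem.Set.add t x) = PySem.Set.add (List.foldl PySem.Set.add s t) x := by
  by_cases h : PySem.Set.contains t x
  · have hx : x ∈ t := by
      simpa [PySem.Set.contains] using List.contains_iff_mem.mp h
    have hmem : x ∈ List.foldl PySem.Set.add s t := (pv_mem_foldl_add t s x).mpr (Or.inr hx)
    simp [PySem.Set.add, hx, hmem]
  · have hx : x ∉ t := by
      intro hm
      exact h (by simpa [PySem.Set.contains] using List.contains_iff_mem.mpr hm)
    rw [show PySem.Set.add t x = t ++ [x] from by simp [PySem.Set.add, hx], List.foldl_append]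
    rfl

-- folding an already-deduplicated list is folding the raw list
theorem pv_foldl_add_foldl_add (v : List String) : ∀ (t s : PySem.Set String),
    List.foldl PySem.Set.add s (List.foldl PySem.Set.add t v)
      = List.foldl PySem.Set.add (List.foldl PySem.Set.add s t) v := by
  induction v with
  | nil => intro t s; rfl
  | cons x v ih =>
    intro t s
    simp only [List.foldl_cons]
    rw [ih (PySem.Set.add t x) s, pv_foldl_add_add]

theorem pv_update_ofList (s : PySem.Set String) (v : List String) :
    PySem.Set.update s (PySem.Set.ofList v) = PySem.Set.update s v := by
  simpa [PySem.Set.update, PySem.Set.ofList, PySem.Set.empty]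
    using pv_foldl_add_foldl_add v PySem.Set.empty s

-- B's inner loop over one person's list of things, looked up at one thing t
theorem pv_inner_getD (nm t : String) : ∀ (v : List String) (o : PySem.Dict String (PySem.Set String)),
    (v.foldl (fun o u => o.modify u PySem.Set.empty (fun s => s.add nm)) o).getD t PySem.Set.empty
      = if v.contains t then (o.getD t PySem.Set.empty).add nm else o.getD t PySem.Set.empty := by
  intro v
  induction v with
  | nil => intro o; simp
  | cons u v ih =>
    intro o
    simp only [List.foldl_cons]
    rw [ih]
    by_cases h : t = u
    · subst h
      rw [PySem.Dict.getD_modify]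
      simp
    · rw [PySem.Dict.getD_modify]
      simp [h]

-- B's index-building loop, looked up at one thing t
theorem pv_owners_getD (t : String) : ∀ (L : List (String × List String)) (o : PySem.Dict String (PySem.Set String)),
    (L.foldl (fun o p => p.2.foldl (fun o u => o.modify u PySem.Set.empty (fun s => s.add p.1)) o) o).getD t PySem.Set.empty
      = L.foldl (fun s p => if p.2.contains t then s.add p.1 else s) (o.getD t PySem.Set.empty) := by
  intro L
  induction L with
  | nil => intro o; rfl
  | cons p L ih =>
    intro o
    simp only [List.foldl_cons]
    rw [ih, pv_inner_getD]

-- with pairwise-distinct names, accumulating names into a set is just collecting them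
theorem pv_fold_add_names (pred : String × List String → Bool) :
    ∀ (L : List (String × List String)) (s : PySem.Set String),
    (L.map Prod.fst).Nodup → (∀ p ∈ L, p.1 ∉ s) →
    L.foldl (fun s p => if pred p then s.add p.1 else s) s = s ++ (L.filter pred).map Prod.fst := by
  intro L
  induction L with
  | nil => intro s _ _; simp
  | cons p L ih =>
    intro s hnd hf
    simp only [List.map_cons, List.nodup_cons] at hnd
    have hs : p.1 ∉ s := hf p (List.mem_cons_self)
    have hftail : ∀ q ∈ L, q.1 ∉ s := fun q hq => hf q (List.mem_cons_of_mem _ hq)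
    by_cases h : pred p
    · have hadd : PySem.Set.add s p.1 = s ++ [p.1] := by
        simp [PySem.Set.add, PySem.Set.contains, hs]
      have hf' : ∀ q ∈ L, q.1 ∉ s ++ [p.1] := by
        intro q hq
        simp only [List.mem_append, List.mem_singleton]
        rintro (hmem | heq)
        · exact hftail q hq hmem
        · exact hnd.1 (heq ▸ List.mem_map_of_mem hq)
      rw [List.foldl_cons, if_pos h, hadd, ih (s ++ [p.1]) hnd.2 hf',
        List.filter_cons_of_pos h]
      simp
    · rw [List.foldl_cons, if_neg (by simp [h]), ih s hnd.2 hftail,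
        List.filter_cons_of_neg (by simp [h])]

-- keys of B's index = folding every list of things into the accumulated set of seen things
theorem pv_owners_keys : ∀ (L : List (String × List String)) (o : PySem.Dict String (PySem.Set String)),
    (L.foldl (fun o p => p.2.foldl (fun o u => o.modify u PySem.Set.empty (fun s => s.add p.1)) o) o).keys
      = L.foldl (fun ks p => PySem.Set.update ks p.2) o.keys := by
  intro L
  induction L with
  | nil => intro o; rfl
  | cons p L ih =>
    intro o
    simp only [List.foldl_cons]
    rw [ih]
    have := PySem.Dict.keys_foldl_modify_key p.2 (fun t => t) PySem.Set.empty
      (fun _ _ => fun s => s.add p.1) o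
    simp only [List.map_id'] at this
    rw [this]

theorem pv_owners_keys_nodup : ∀ (L : List (String × List String)) (o : PySem.Dict String (PySem.Set String)),
    o.keys.Nodup →
    (L.foldl (fun o p => p.2.foldl (fun o u => o.modify u PySem.Set.empty (fun s => s.add p.1)) o) o).keys.Nodup := by
  intro L
  induction L with
  | nil => intro o h; exact h
  | cons p L ih =>
    intro o h
    simp only [List.foldl_cons]
    exact ih _ (PySem.Dict.nodup_keys_foldl_modify_key p.2 (fun t => t) PySem.Set.empty
      (fun _ _ => fun s => s.add p.1) o h)

-- scanning all names for one not owning t = the names of the non-owning rows (names pairwise distinct)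
theorem pv_missing_names (L : List (String × List String)) (hnd : (L.map Prod.fst).Nodup) (t : String) :
    (L.map Prod.fst).filter (fun nm => !((pvWho L t).contains nm)) = pvMiss L t := by
  unfold pvWho pvMiss
  rw [List.filter_map]
  congr 1
  apply List.filter_congr
  intro p hp
  have key : ((L.filter (fun q => q.2.contains t)).map Prod.fst).contains p.1 = p.2.contains t := by
    by_cases h : p.2.contains t = true
    · rw [h]
      exact List.contains_iff_mem.mpr (List.mem_map_of_mem (List.mem_filter.mpr ⟨hp, h⟩))
    · have h' : p.2.contains t = false := by simpa using h
      rw [h']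
      by_contra hc
      have hc' : ((L.filter (fun q => q.2.contains t)).map Prod.fst).contains p.1 = true := by
        simpa using hc
      obtain ⟨q, hqf, hq1⟩ := List.mem_map.mp (List.contains_iff_mem.mp hc')
      obtain ⟨hqL, hqp⟩ := List.mem_filter.mp hqf
      have hqe : q = p := List.inj_on_of_nodup_map hnd hqL hp hq1
      rw [hqe, h'] at hqp
      exact Bool.false_ne_true hqp
  show (!((L.filter (fun q => q.2.contains t)).map Prod.fst).contains p.1) = (!(p.2.contains t))
  rw [key]

theorem pv_countP_not (L : List (String × List String)) (p : String × List String → Bool) :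
    L.countP p + L.countP (fun x => !p x) = L.length := by
  induction L with
  | nil => rfl
  | cons x L ih => by_cases h : p x <;> simp [h] <;> omega

-- a row with `count = n - 1` has exactly one non-owning row
theorem pv_one_missing (L : List (String × List String)) (t : String)
    (hc : ((L.countP (fun p => p.2.contains t) : Int)) = (L.length : Int) - 1) :
    ∃ q, L.filter (fun p => !(p.2.contains t)) = [q] := by
  have h1 := pv_countP_not L (fun p => p.2.contains t)
  have hlen : (L.filter (fun p => !(p.2.contains t))).length = 1 := by
    rw [← List.countP_eq_length_filter]
    omega
  exact List.length_eq_one_iff.mp hlen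

-- Prop-conditioned append-loop is a filter (bridges to PySem.List.foldl_append_if)
theorem pv_foldl_append_if_prop {α : Type} (p : α → Prop) [DecidablePred p] (l acc : List α) :
    l.foldl (fun acc x => if p x then acc ++ [x] else acc) acc
      = acc ++ l.filter (fun x => decide (p x)) := by
  have hfun : (fun (acc : List α) x => if p x then acc ++ [x] else acc)
      = (fun acc x => if (decide (p x)) = true then acc ++ [id x] else acc) := by
    funext acc x
    by_cases h : p x <;> simp [h]
  rw [hfun, PySem.List.foldl_append_if (fun x => decide (p x)) id l acc, List.map_id]

-- A's two stages (collect targets, then fold over them) are one conditioned fold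
theorem pv_two_stage {α β : Type} (p : α → Prop) [DecidablePred p] (g : β → α → β)
    (l : List α) (init : β) :
    List.foldl g init (l.foldl (fun acc x => if p x then acc ++ [x] else acc) [])
      = List.foldl (fun acc x => if p x then g acc x else acc) init l := by
  rw [pv_foldl_append_if_prop, List.nil_append, List.foldl_filter]
  congr 1
  funext acc x
  by_cases h : p x <;> simp [h]

-- A's inner search loop, when exactly one row lacks `t`, is one insert of that row's name
theorem pv_innerA (dd : PySem.Dict String (List String)) (hnd : dd.keys.Nodup) (t : String)
    (hone : ∃ q, dd.items.filter (fun p => !(p.2.contains t)) = [q]) (r : PySem.Dict String String) :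
    List.foldl (fun r names =>
        if !((dd.getD names []).contains t) then
          r.insert t ("- эту вещь не взял " ++ names) else r) r dd.keys
      = r.insert t ("- эту вещь не взял " ++ pvm dd.items t) := by
  obtain ⟨q, hq⟩ := hone
  rw [show dd.keys = dd.items.map Prod.fst from rfl, List.foldl_map]
  rw [PySem.List.foldl_congr_mem _ _
    (fun r (p : String × List String) =>
      if !(p.2.contains t) then r.insert t ("- эту вещь не взял " ++ p.1) else r) _
    (by
      intro acc p hp
      have : dd.getD p.1 [] = p.2 := PySem.Dict.getD_of_mem_items dd (by simpa using hp) hnd []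
      rw [this])]
  rw [← List.foldl_filter, hq]
  unfold pvm pvMiss
  rw [hq]
  rfl

-- the heart of the proof: both loop nests, over any dict with (necessarily) distinct keys, build the same items list
theorem pv_main (dd : PySem.Dict String (List String)) (hnd : dd.keys.Nodup) :
    (List.foldl (fun r target =>
        List.foldl (fun r names =>
          if !((dd.getD names []).contains target) then
            r.insert target ("- эту вещь не взял " ++ names) else r) r dd.keys)
      PySem.Dict.empty
      (List.foldl (fun acc thing =>
        if (List.foldl (fun c individual_lists_of_things =>
              if individual_lists_of_things.contains thing then c + 1 else c) (0:Int) dd.values)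
            = (dd.size : Int) - 1 then acc ++ [thing] else acc) []
        (List.foldl (fun s things => PySem.Set.union s (PySem.Set.ofList things)) PySem.Set.empty dd.values))).items
    =
    (List.foldl (fun r tw =>
        if PySem.Set.len tw.2 = (dd.size : Int) - 1 then
          match dd.keys.filter (fun nm => !(PySem.Set.contains tw.2 nm)) with
          | missing :: _ => r.insert tw.1 ("- эту вещь не взял " ++ missing)
          | [] => r
        else r) PySem.Dict.empty
      (List.foldl (fun o p =>
        List.foldl (fun o t => o.modify t PySem.Set.empty (fun s => s.add p.1)) o p.2)
        PySem.Dict.empty dd.items).items).items := by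
  have hndL : (dd.items.map Prod.fst).Nodup := hnd
  -- A: the union loop collects every thing, first occurrence first
  have hall : List.foldl (fun s things => PySem.Set.union s (PySem.Set.ofList things))
      PySem.Set.empty dd.values = pvALL dd.items := by
    rw [show dd.values = dd.items.map Prod.snd from rfl, List.foldl_map]
    exact PySem.List.foldl_congr_mem _ _ _ _ (fun s p _ => pv_update_ofList s p.2)
  -- A: the counting loop is countP
  have hcount : ∀ t : String,
      List.foldl (fun c individual_lists_of_things =>
        if individual_lists_of_things.contains t then c + 1 else c) (0:Int) dd.values
      = ((dd.items.countP (fun p => p.2.contains t) : Int)) := by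
    intro t
    rw [show dd.values = dd.items.map Prod.snd from rfl, List.foldl_map]
    simpa using PySem.List.foldl_count_if (fun p : String × List String => p.2.contains t) dd.items 0
  -- B: the index dict
  have hOkeys := pv_owners_keys dd.items PySem.Dict.empty
  have hOnodup : (List.foldl (fun o p =>
      List.foldl (fun o t => o.modify t PySem.Set.empty (fun s => s.add p.1)) o p.2)
      PySem.Dict.empty dd.items).keys.Nodup :=
    pv_owners_keys_nodup dd.items PySem.Dict.empty List.nodup_nil
  have hOget : ∀ t, (List.foldl (fun o p =>
      List.foldl (fun o t => o.modify t PySem.Set.empty (fun s => s.add p.1)) o p.2)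
      PySem.Dict.empty dd.items).getD t PySem.Set.empty = pvWho dd.items t := by
    intro t
    rw [pv_owners_getD]
    have := pv_fold_add_names (fun p => p.2.contains t) dd.items [] hndL (by simp)
    simpa [pvWho] using this
  have hitems : (List.foldl (fun o p =>
      List.foldl (fun o t => o.modify t PySem.Set.empty (fun s => s.add p.1)) o p.2)
      PySem.Dict.empty dd.items).items
      = (pvALL dd.items).map (fun t => (t, pvWho dd.items t)) := by
    rw [PySem.Dict.items_eq_map_keys _ hOnodup PySem.Set.empty, hOkeys]
    simp only [hOget]
    rfl
  -- rewrite both sides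
  simp only [hcount]
  rw [hall, hitems, List.foldl_map]
  have hlenwho : ∀ t, PySem.Set.len (pvWho dd.items t)
      = ((dd.items.countP (fun p => p.2.contains t) : Int)) := by
    intro t
    simp [PySem.Set.len, pvWho, List.countP_eq_length_filter]
  simp only [hlenwho]
  have h2s := pv_two_stage (α := String) (β := PySem.Dict String String)
    (fun t => ((dd.items.countP (fun p => p.2.contains t) : Int)) = (dd.size : Int) - 1)
    (fun (r : PySem.Dict String String) (target : String) =>
      List.foldl (fun (r : PySem.Dict String String) (names : String) =>
        if !((dd.getD names []).contains target) then
          r.insert target ("- эту вещь не взял " ++ names) else r) r dd.keys)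
    (pvALL dd.items) PySem.Dict.empty
  rw [h2s]
  congr 1
  apply PySem.List.foldl_congr_mem
  intro acc t _ht
  by_cases h : ((dd.items.countP (fun p => p.2.contains t) : Int)) = (dd.size : Int) - 1
  · rw [if_pos h, if_pos h]
    obtain ⟨q, hq⟩ := pv_one_missing dd.items t (by simpa using h)
    rw [pv_innerA dd hnd t ⟨q, hq⟩ acc]
    have hmiss : dd.keys.filter (fun nm => !(PySem.Set.contains (pvWho dd.items t) nm))
        = pvMiss dd.items t := pv_missing_names dd.items hndL t
    rw [hmiss, show pvMiss dd.items t = [q.1] from by unfold pvMiss; rw [hq]; rfl]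
    unfold pvm pvMiss
    rw [hq]
    rfl
  · rw [if_neg h, if_neg h]

-- ===== VERDICT (by name: the statement is the Claim_ definition above) =====
theorem strange_task_spec : Claim_equal_strange_task := by
  intro incoming_dict _hdom
  show strange_task incoming_dict = strange_task_alt incoming_dict
  exact pv_main (PySem.Dict.ofList incoming_dict) (PySem.Dict.nodup_keys_ofList incoming_dict)
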